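-- pv_equiv track=rewrite | github.com/narbi5h/Health-Care-Analysis---Florida | postgres pipeline scripts/File_gatekeeper.py | is_header_like
-- ===== SOURCE A (Python) =====
-- from typing import Optional, Tuple, List
--
-- def is_header_like(fields: List[str]) -> bool:
--     """Heuristic: 2+ columns, many alpha tokens, not mostly numeric, no giant blobs."""
--     if len(fields) < 2:
--         return False
--     clean = [f.strip() for f in fields]
--     if any(len(f) > 200 for f in clean):
--         return False
--     has_alpha = sum(1 for f in clean if any(ch.isalpha() or ch == "_" for ch in f))
--     numeric_only = sum(1 for f in clean if f and all(ch.isdigit() or ch in ".-+" for ch in f))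
--     return has_alpha >= max(1, len(clean) // 2) and numeric_only < len(clean) * 0.5
-- ===== SOURCE B (Python) =====
-- def _summarize(fields):
--     """Divide-and-conquer: return None if any stripped field exceeds 200 chars,
--     else (alpha_count, numeric_count) for this slice. Never called on []."""
--     if len(fields) == 1:
--         s = fields[0].strip()
--         if len(s) > 200:
--             return None
--         alpha = 1 if any(ch.isalpha() or ch == "_" for ch in s) else 0
--         numeric = 1 if s and all(ch.isdigit() or ch in ".-+" for ch in s) else 0
--         return (alpha, numeric)
--     mid = len(fields) // 2
--     left = _summarize(fields[:mid])
--     if left is None: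
--         return None
--     right = _summarize(fields[mid:])
--     if right is None:
--         return None
--     return (left[0] + right[0], left[1] + right[1])
--
--
-- def is_header_like(fields):
--     """Heuristic: 2+ columns, many alpha tokens, not mostly numeric, no giant blobs."""
--     n = len(fields)
--     if n < 2:
--         return False
--     summary = _summarize(fields)
--     if summary is None:
--         return False
--     alpha, numeric = summary
--     return alpha >= max(1, n // 2) and numeric < n * 0.5
-- ===== Notes on version B (the rewrite author's own statement) =====
-- stated objective: alternative
-- what changed: B replaces A's staged whole-list passes (strip comprehension, any(), two counting sums) with a recursive divide-and-conquer summarizer that splits the list in halves, returns None when a stripped field exceeds 200 chars, and merges (alpha,numeric) count pairs from the halves.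
import Mathlib
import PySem

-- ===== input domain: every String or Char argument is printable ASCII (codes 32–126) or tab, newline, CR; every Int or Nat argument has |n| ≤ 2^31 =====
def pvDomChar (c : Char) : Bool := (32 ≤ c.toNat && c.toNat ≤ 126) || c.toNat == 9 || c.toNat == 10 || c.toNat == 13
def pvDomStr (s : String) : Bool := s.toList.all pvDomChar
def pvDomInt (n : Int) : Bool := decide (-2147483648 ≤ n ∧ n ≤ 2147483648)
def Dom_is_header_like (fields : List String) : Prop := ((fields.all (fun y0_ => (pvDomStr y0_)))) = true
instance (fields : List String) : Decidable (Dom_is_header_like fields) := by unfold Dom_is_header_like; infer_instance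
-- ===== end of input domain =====

-- B replaces A's staged whole-list passes with a recursive divide-and-conquer summarizer that
-- merges (alpha, numeric) count pairs from the two halves; same results, different decomposition.

-- ===== PORT A =====
-- 'numeric_only < len(clean) * 0.5' is ported as '2 * numeric_only < clean.length' (exact: both
-- sides are small integers, and the float len*0.5 is exact for these sizes).
def is_header_like (fields : List String) : Bool :=
  if fields.length < 2 then false
  else
    let clean := fields.map (fun f => PySem.Str.strip f)
    if clean.any (fun f => 200 < PySem.Str.len f) then false
    else
      let has_alpha := clean.countP (fun f => f.toList.any (fun ch => PySem.Chars.isalpha ch || ch == '_'))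
      let numeric_only := clean.countP (fun f => !f.toList.isEmpty && f.toList.all (fun ch => PySem.Chars.isdigit ch || ch == '.' || ch == '-' || ch == '+'))
      decide (max 1 (clean.length / 2) ≤ has_alpha) && decide (2 * numeric_only < clean.length)

-- ===== PORT B =====
def altAlpha (s : String) : Bool :=
  s.toList.any (fun ch => PySem.Chars.isalpha ch || ch == '_')

def altNumeric (s : String) : Bool :=
  !s.toList.isEmpty && s.toList.all (fun ch => PySem.Chars.isdigit ch || ch == '.' || ch == '-' || ch == '+')

-- divide-and-conquer summary of one slice; 'none' = some stripped field exceeds 200 chars.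
-- Python's _summarize is never called on []; the [] case here is unreachable from
-- is_header_like_alt (the length guard ensures the recursion bottoms out at singletons).
def altSummarize : List String → Option (Nat × Nat)
  | [] => some (0, 0)
  | [f] =>
    let s := PySem.Str.strip f
    if 200 < PySem.Str.len s then none
    else some ((if altAlpha s then 1 else 0), (if altNumeric s then 1 else 0))
  | f :: g :: rest =>
    let l := f :: g :: rest
    let mid := l.length / 2
    match altSummarize (l.take mid) with
    | none => none
    | some (a1, n1) =>
      match altSummarize (l.drop mid) with
      | none => none
      | some (a2, n2) => some (a1 + a2, n1 + n2)
termination_by l => l.length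
decreasing_by
  · simp only [List.length_take, List.length_cons]
    omega
  · simp only [List.length_drop, List.length_cons]
    omega

def is_header_like_alt (fields : List String) : Bool :=
  if fields.length < 2 then false
  else
    match altSummarize fields with
    | none => false
    | some (alpha, numeric) =>
      decide (max 1 (fields.length / 2) ≤ alpha) && decide (2 * numeric < fields.length)

-- ===== PRECONDITION & SPEC =====
def Spec_is_header_like (fields : List String) (out : Bool) : Prop := out = is_header_like_alt fields
instance (fields : List String) (out : Bool) : Decidable (Spec_is_header_like fields out) := by unfold Spec_is_header_like; infer_instance

-- ===== CLAIM (what is proved, stated in full; the proofs are below) =====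
def Claim_equal_is_header_like : Prop := ∀ (fields : List String), Dom_is_header_like fields → Spec_is_header_like fields (is_header_like fields)

-- ===== LEMMAS AND PROOFS =====
-- the staged (A-style) summary that altSummarize computes
def stagedSummary (l : List String) : Option (Nat × Nat) :=
  if (l.map (fun f => PySem.Str.strip f)).any (fun f => 200 < PySem.Str.len f) then none
  else some ((l.map (fun f => PySem.Str.strip f)).countP altAlpha,
             (l.map (fun f => PySem.Str.strip f)).countP altNumeric)

lemma stagedSummary_append (l₁ l₂ : List String) :
    stagedSummary (l₁ ++ l₂) =
      match stagedSummary l₁ with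
      | none => none
      | some (a1, n1) =>
        match stagedSummary l₂ with
        | none => none
        | some (a2, n2) => some (a1 + a2, n1 + n2) := by
  unfold stagedSummary
  rw [List.map_append, List.any_append, List.countP_append, List.countP_append]
  cases h1 : (l₁.map (fun f => PySem.Str.strip f)).any (fun f => decide (200 < PySem.Str.len f)) with
  | true => simp
  | false =>
    cases h2 : (l₂.map (fun f => PySem.Str.strip f)).any (fun f => decide (200 < PySem.Str.len f)) with
    | true => simp
    | false => simp

lemma altSummarize_single (f : String) : altSummarize [f] = stagedSummary [f] := by
  rw [altSummarize]
  simp only [stagedSummary, List.map_cons, List.map_nil, List.any_cons, List.any_nil,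
    Bool.or_false, List.countP_cons, List.countP_nil, decide_eq_true_eq, Nat.zero_add]


lemma altSummarize_bounded : ∀ (n : Nat) (l : List String), l.length ≤ n →
    altSummarize l = stagedSummary l := by
  intro n
  induction n with
  | zero =>
    intro l hl
    have : l = [] := List.eq_nil_of_length_eq_zero (Nat.le_zero.mp hl)
    subst this
    simp [altSummarize, stagedSummary]
  | succ n ih =>
    intro l hl
    match l with
    | [] => simp [altSummarize, stagedSummary]
    | [f] => exact altSummarize_single f
    | f :: g :: rest =>
      rw [altSummarize]
      have hlen : (f :: g :: rest).length = rest.length + 2 := by simp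
      have hmid1 : 1 ≤ (f :: g :: rest).length / 2 := by omega
      have hmid2 : (f :: g :: rest).length / 2 < (f :: g :: rest).length := by omega
      rw [ih _ (by simp only [List.length_take]; omega),
          ih _ (by simp only [List.length_drop]; omega)]
      conv_rhs => rw [← List.take_append_drop ((f :: g :: rest).length / 2) (f :: g :: rest),
        stagedSummary_append]

theorem altSummarize_eq (l : List String) : altSummarize l = stagedSummary l :=
  altSummarize_bounded l.length l (Nat.le_refl _)

-- ===== VERDICT (by name: the statement is the Claim_ definition above) =====
theorem is_header_like_spec : Claim_equal_is_header_like := by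
  intro fields _
  unfold Spec_is_header_like is_header_like is_header_like_alt
  by_cases h2 : fields.length < 2
  · simp [h2]
  · rw [if_neg h2, if_neg h2, altSummarize_eq]
    unfold stagedSummary
    by_cases hb : ((fields.map (fun f => PySem.Str.strip f)).any fun f => decide (200 < PySem.Str.len f)) = true
    · rw [if_pos hb, if_pos hb]
    · rw [if_neg hb, if_neg hb]
      simp only [List.length_map]
      rfl
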